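-- pv_equiv track=rewrite | github.com/Jkouj/Python | HW/hw8.py | k_Fletcher32
-- ===== SOURCE A (Python) =====
-- def k_Fletcher32(string,k):
--     # This function calculates the checksum of the given string
--     # string: the input being tested
--     # k: the amount of times we are summing through the list
--     aList = []
--     kList = []
--     checksum = 0
--     # building the aList
--     for i in range(len(string)):
--         aList.append(ord(string[i]))
--     kList = aList
--     # building the list k amount of times
--     while k > 0:
--         kList = listSum(kList)
--         k = k - 1
--     # finding the checksum
--     for i in range(len(kList)):
--         checksum = checksum + kList[i]
--     return checksum % 65535
--
-- def listSum(lst):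
--     # building the kList
--     # lst: the kList
--     kList = [0]
--     k = 0
--     for i in range(len(lst)):
--         k = k + lst[i]
--         kList.append(k)
--     return kList
-- ===== SOURCE B (Python) =====
-- def k_Fletcher32(string, k):
--     # Closed form: the k-fold prefix-sum checksum is a binomial-weighted sum of
--     # the character codes: sum_j C(kk + n-1-j, kk) * ord(string[j]), kk = max(k, 0).
--     # The coefficients are generated incrementally while scanning the string backwards.
--     kk = k if k > 0 else 0
--     total = 0
--     c = 1          # c = C(kk + m, kk) for the m-th char from the end
--     m = 0
--     for ch in reversed(string):
--         total += c * ord(ch)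
--         c = c * (kk + m + 1) // (m + 1)
--         m += 1
--     return total % 65535
-- ===== Notes on version B (the rewrite author's own statement) =====
-- stated objective: faster
-- what changed: Replaces the k iterated prefix-sum passes over a growing list by a single backward scan that applies the closed-form binomial coefficients C(k+m, k) of the k-fold prefix sum, computed incrementally.
import Mathlib
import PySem

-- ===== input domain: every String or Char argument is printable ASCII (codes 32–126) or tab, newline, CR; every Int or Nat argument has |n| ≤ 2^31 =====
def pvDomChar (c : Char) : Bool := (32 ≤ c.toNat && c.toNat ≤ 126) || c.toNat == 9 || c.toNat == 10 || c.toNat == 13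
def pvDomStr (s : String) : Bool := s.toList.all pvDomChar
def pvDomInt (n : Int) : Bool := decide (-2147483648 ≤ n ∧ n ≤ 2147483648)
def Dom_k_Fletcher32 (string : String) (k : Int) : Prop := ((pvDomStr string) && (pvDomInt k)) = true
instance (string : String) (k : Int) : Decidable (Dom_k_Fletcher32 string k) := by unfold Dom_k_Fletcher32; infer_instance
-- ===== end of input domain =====

-- B replaces A's k iterated prefix-sum passes by one backward scan with incrementally
-- computed closed-form binomial coefficients (objective: faster, asymptotically).

-- ===== PORT A =====
-- helper listSum: kList = [0]; k = 0; for i in range(len(lst)): k += lst[i]; kList.append(k)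
def k_listSum (lst : List Int) : List Int :=
  (lst.foldl (fun (p : List Int × Int) x => (p.1 ++ [p.2 + x], p.2 + x)) ([0], 0)).1

-- while k > 0: kList = listSum(kList); k = k - 1   (runs k.toNat times)
def k_iterLoop : Nat → List Int → List Int
  | 0, l => l
  | n+1, l => k_iterLoop n (k_listSum l)

def k_Fletcher32 (string : String) (k : Int) : Int :=
  let aList := string.toList.foldl (fun acc c => acc ++ [(c.toNat : Int)]) []
  let kList := k_iterLoop k.toNat aList
  let checksum := kList.foldl (fun s x => s + x) 0
  PySem.Int.mod checksum 65535

-- ===== PORT B =====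
-- state (total, c, m); one pass over reversed(string)
def k_Fletcher32_alt (string : String) (k : Int) : Int :=
  let kk : Int := if k > 0 then k else 0
  let st := string.toList.reverse.foldl
      (fun (p : Int × Int × Int) ch =>
        (p.1 + p.2.1 * (ch.toNat : Int),
         PySem.Int.floordiv (p.2.1 * (kk + p.2.2 + 1)) (p.2.2 + 1),
         p.2.2 + 1))
      (0, 1, 0)
  PySem.Int.mod st.1 65535

-- ===== PRECONDITION & SPEC =====
def Spec_k_Fletcher32 (string : String) (k : Int) (out : Int) : Prop := out = k_Fletcher32_alt string k
instance (string : String) (k : Int) (out : Int) : Decidable (Spec_k_Fletcher32 string k out) := by unfold Spec_k_Fletcher32; infer_instance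

-- ===== CLAIM (what is proved, stated in full; the proofs are below) =====
def Claim_equal_k_Fletcher32 : Prop := ∀ (string : String) (k : Int), Dom_k_Fletcher32 string k → Spec_k_Fletcher32 string k (k_Fletcher32 string k)

-- ===== LEMMAS AND PROOFS =====

-- spec-side prefix sums: psums s [a,b,...] = [s+a, s+a+b, ...]
def psums : Int → List Int → List Int
  | _, [] => []
  | s, x :: xs => (s + x) :: psums (s + x) xs

theorem psums_length (s : Int) (l : List Int) : (psums s l).length = l.length := by
  induction l generalizing s with
  | nil => rfl
  | cons x xs ih => simp [psums, ih]

theorem listSum_foldl (l : List Int) (acc : List Int) (s : Int) :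
    l.foldl (fun (p : List Int × Int) x => (p.1 ++ [p.2 + x], p.2 + x)) (acc, s)
      = (acc ++ psums s l, s + l.sum) := by
  induction l generalizing acc s with
  | nil => simp [psums]
  | cons x xs ih => simp [psums, ih]; ring

theorem k_listSum_eq (l : List Int) : k_listSum l = 0 :: psums 0 l := by
  simp [k_listSum, listSum_foldl]

theorem sum_take_getD (l : List Int) (j : Nat) (hj : j < l.length) :
    (psums 0 l).getD j 0 = (l.take (j+1)).sum := by
  suffices h : ∀ (l : List Int) (s : Int) (j : Nat), j < l.length →
      (psums s l).getD j 0 = s + (l.take (j+1)).sum by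
    simpa using h l 0 j hj
  intro l
  induction l with
  | nil => intro s j hj; simp at hj
  | cons x xs ih =>
    intro s j hj
    cases j with
    | zero => simp [psums]
    | succ j =>
      simp only [psums, List.getD_cons_succ, List.take_succ_cons, List.sum_cons]
      rw [ih (s+x) j (by simpa using hj)]
      ring

theorem sum_eq_range_getD (l : List Int) :
    l.sum = ∑ j ∈ Finset.range l.length, l.getD j 0 := by
  induction l with
  | cons x xs ih => simp [Finset.sum_range_succ', ih]; ring
  | nil => simp

theorem take_sum_eq_range (l : List Int) (m : Nat) :
    (l.take m).sum = ∑ t ∈ Finset.range m, l.getD t 0 := by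
  induction l generalizing m with
  | nil => simp
  | cons x xs ih =>
    cases m with
    | zero => simp
    | succ m => simp [Finset.sum_range_succ', ih]; ring

theorem sum_if_lt (n i : Nat) (h : i ≤ n) (f : Nat → Int) :
    ∑ t ∈ Finset.range n, (if t < i then f t else 0) = ∑ t ∈ Finset.range i, f t := by
  rw [← Finset.sum_filter]
  congr 1
  ext x
  simp only [Finset.mem_filter, Finset.mem_range]
  omega

theorem hockey (K n : Nat) : ∑ m ∈ Finset.range n, (K+m).choose K = (K+n).choose (K+1) := by
  induction n with
  | zero => simp
  | succ n ih => rw [Finset.sum_range_succ, ih, show K+(n+1) = (K+n)+1 by ring, Nat.choose_succ_succ']; omega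

-- the inner coefficient sum of the induction step
theorem kInnerSum (K n t : Nat) (ht : t < n) :
    ∑ i ∈ Finset.range n, (if t < i+1 then ((K+(n-1-i)).choose K : Int) else 0)
      = (((K+1)+(n-1-t)).choose (K+1) : Int) := by
  rw [← Finset.sum_range_reflect]
  have hcong : ∀ j ∈ Finset.range n,
      (if t < (n-1-j)+1 then ((K+(n-1-(n-1-j))).choose K : Int) else 0)
        = (if j < n - t then ((K+j).choose K : Int) else 0) := by
    intro j hj
    simp only [Finset.mem_range] at hj
    have h1 : n-1-(n-1-j) = j := by omega
    rw [h1]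
    by_cases hcase : t < (n-1-j)+1
    · rw [if_pos hcase, if_pos (by omega)]
    · rw [if_neg hcase, if_neg (by omega)]
  rw [Finset.sum_congr rfl hcong, sum_if_lt n (n-t) (by omega)]
  have hcast : ∑ j ∈ Finset.range (n-t), ((K+j).choose K : Int)
      = ((∑ j ∈ Finset.range (n-t), (K+j).choose K : Nat) : Int) := by push_cast; rfl
  rw [hcast, hockey]
  congr 2
  omega

-- A's k-fold prefix-sum checksum in closed form
theorem iter_sum (K : Nat) (a : List Int) :
    (k_iterLoop K a).sum
      = ∑ j ∈ Finset.range a.length, ((K+(a.length-1-j)).choose K : Int) * a.getD j 0 := by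
  induction K generalizing a with
  | zero => simpa using sum_eq_range_getD a
  | succ K ih =>
    show (k_iterLoop K (k_listSum a)).sum = _
    rw [ih, k_listSum_eq,
      show (0 :: psums 0 a).length = a.length + 1 by simp [psums_length],
      Finset.sum_range_succ']
    simp only [List.getD_cons_succ, List.getD_cons_zero, mul_zero, add_zero]
    have step1 : ∀ i ∈ Finset.range a.length,
        ((K+((a.length+1)-1-(i+1))).choose K : Int) * (psums 0 a).getD i 0
          = ∑ t ∈ Finset.range a.length,
              (if t < i+1 then ((K+(a.length-1-i)).choose K : Int) * a.getD t 0 else 0) := by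
      intro i hi
      simp only [Finset.mem_range] at hi
      rw [show (a.length+1)-1-(i+1) = a.length-1-i by omega,
        sum_take_getD a i hi, take_sum_eq_range, Finset.mul_sum,
        ← sum_if_lt a.length (i+1) (by omega) (fun t => ((K+(a.length-1-i)).choose K : Int) * a.getD t 0)]
    rw [Finset.sum_congr rfl step1, Finset.sum_comm]
    apply Finset.sum_congr rfl
    intro t ht
    simp only [Finset.mem_range] at ht
    have hsplit : ∀ i ∈ Finset.range a.length,
        (if t < i+1 then ((K+(a.length-1-i)).choose K : Int) * a.getD t 0 else 0)
          = (if t < i+1 then ((K+(a.length-1-i)).choose K : Int) else 0) * a.getD t 0 := by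
      intro i _; split <;> simp
    rw [Finset.sum_congr rfl hsplit, ← Finset.sum_mul, kInnerSum K a.length t ht]

-- B's loop invariant: c = C(K+m, K), total accumulates the binomial-weighted sum
theorem b_fold (K : Nat) (b : List Int) (m : Nat) (total : Int) :
    (b.foldl
      (fun (p : Int × Int × Int) x =>
        (p.1 + p.2.1 * x,
         PySem.Int.floordiv (p.2.1 * ((K:Int) + p.2.2 + 1)) (p.2.2 + 1),
         p.2.2 + 1))
      (total, ((K+m).choose K : Int), (m:Int))).1
      = total + ∑ i ∈ Finset.range b.length, ((K+(m+i)).choose K : Int) * b.getD i 0 := by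
  induction b generalizing m total with
  | nil => simp
  | cons x xs ih =>
    simp only [List.foldl_cons]
    have hsym : (K+m).choose K = (K+m).choose m := Nat.choose_symm_add
    have hsym2 : (K+m+1).choose K = (K+m+1).choose (m+1) := by
      rw [show K+m+1 = K+(m+1) by ring]; exact Nat.choose_symm_add
    have hnat2 : (K+m).choose K * (K+m+1) = (K+m+1).choose K * (m+1) := by
      rw [hsym, hsym2, Nat.mul_comm]
      exact Nat.add_one_mul_choose_eq (K+m) m
    have hc : PySem.Int.floordiv (((K+m).choose K : Int) * ((K:Int) + (m:Int) + 1)) ((m:Int) + 1)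
        = ((K+(m+1)).choose K : Int) := by
      have hmul : ((K+m).choose K : Int) * ((K:Int) + (m:Int) + 1)
          = (((K+m+1).choose K * (m+1) : Nat) : Int) := by exact_mod_cast hnat2
      rw [hmul, show ((m:Int) + 1) = ((m+1 : Nat) : Int) by push_cast; ring,
        PySem.Int.floordiv_natCast, Nat.mul_div_cancel _ (by omega),
        show K+m+1 = K+(m+1) by ring]
    have hm1 : (m:Int) + 1 = ((m+1 : Nat) : Int) := by push_cast; ring
    rw [hc, hm1, ih (m+1) (total + ((K+m).choose K : Int) * x),
      List.length_cons, Finset.sum_range_succ']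
    simp only [List.getD_cons_succ, List.getD_cons_zero]
    simp only [show ∀ i, m + 1 + i = m + (i+1) from fun i => by ring]
    simp only [Nat.add_zero]
    ring

-- assembly: both ports equal the closed-form binomial sum
theorem both_eq (string : String) (k : Int) :
    k_Fletcher32 string k = k_Fletcher32_alt string k := by
  have hkk : (if k > 0 then k else 0) = ((k.toNat : Nat) : Int) := by
    split <;> omega
  have hA : k_Fletcher32 string k
      = PySem.Int.mod ((k_iterLoop k.toNat
          (string.toList.foldl (fun acc c => acc ++ [(c.toNat : Int)]) [])).foldl
            (fun s x => s + x) 0) 65535 := rfl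
  have hB : k_Fletcher32_alt string k
      = PySem.Int.mod (string.toList.reverse.foldl
          (fun (p : Int × Int × Int) ch =>
            (p.1 + p.2.1 * (ch.toNat : Int),
             PySem.Int.floordiv (p.2.1 * ((if k > 0 then k else 0) + p.2.2 + 1)) (p.2.2 + 1),
             p.2.2 + 1)) ((0 : Int), (1 : Int), (0 : Int))).1 65535 := rfl
  rw [hA, hB, hkk]
  set K := k.toNat with hK
  set a : List Int := string.toList.map (fun c => (c.toNat : Int)) with ha
  rw [show string.toList.foldl (fun acc c => acc ++ [(c.toNat : Int)]) [] = a by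
    simpa using PySem.List.foldl_append_singleton_eq_map (fun (c : Char) => (c.toNat : Int)) string.toList []]
  rw [show ∀ (l : List Int), l.foldl (fun s x => s + x) 0 = l.sum from fun l => by
    simpa using PySem.List.foldl_add l (fun x => x) 0]
  rw [show string.toList.reverse.foldl
      (fun (p : Int × Int × Int) ch =>
        (p.1 + p.2.1 * (ch.toNat : Int),
         PySem.Int.floordiv (p.2.1 * ((K:Int) + p.2.2 + 1)) (p.2.2 + 1),
         p.2.2 + 1)) ((0 : Int), (1 : Int), (0 : Int))
      = a.reverse.foldl
      (fun (p : Int × Int × Int) x =>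
        (p.1 + p.2.1 * x,
         PySem.Int.floordiv (p.2.1 * ((K:Int) + p.2.2 + 1)) (p.2.2 + 1),
         p.2.2 + 1)) ((0 : Int), (1 : Int), (0 : Int)) by
    rw [ha, ← List.map_reverse, List.foldl_map]]
  congr 1
  rw [iter_sum,
    show ((0:Int), (1:Int), (0:Int)) = ((0:Int), ((K+0).choose K : Int), ((0:Nat) : Int)) by simp,
    b_fold K a.reverse 0 0, List.length_reverse, zero_add]
  simp only [Nat.zero_add]
  rw [← Finset.sum_range_reflect (fun i => ((K+i).choose K : Int) * a.reverse.getD i 0) a.length]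
  apply Finset.sum_congr rfl
  intro j hj
  simp only [Finset.mem_range] at hj
  have hrev : a.reverse.getD (a.length - 1 - j) 0 = a.getD j 0 := by
    rw [List.getD_eq_getElem?_getD, List.getD_eq_getElem?_getD,
      List.getElem?_reverse (by omega), show a.length - 1 - (a.length - 1 - j) = j by omega]
  rw [hrev]

-- ===== VERDICT (by name: the statement is the Claim_ definition above) =====
theorem k_Fletcher32_spec : Claim_equal_k_Fletcher32 := by
  intro string k _
  unfold Spec_k_Fletcher32
  exact both_eq string k
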